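-- pv_equiv track=rewrite | github.com/MPRFun/P12 | test.py | convert_symbols_to_numbers
-- ===== SOURCE A (Python) =====
-- def convert_symbols_to_numbers(symbols: str) -> str:
--     """
--     Converts special symbols to their corresponding numbers for puzzle level 2.
--
--     Args:
--         symbols: String containing symbols to convert
--
--     Returns:
--         str: String with symbols converted to numbers
--     """
--     symbol_map = {
--         '!': '1', '@': '2', '#': '3', '$': '4', '%': '5',
--         '^': '6', '&': '7', '*': '8', '(': '9', ')': '0'
--     }
--     result = symbols
--     for symbol, number in symbol_map.items():
--         result = result.replace(symbol, number)
--     return result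
-- ===== SOURCE B (Python) =====
-- def convert_symbols_to_numbers(symbols: str) -> str:
--     """
--     Converts special symbols to their corresponding numbers for puzzle level 2.
--     Single pass over the characters with a linear scan of two parallel
--     key/digit strings (no dict, no whole-string replace passes).
--     """
--     keys = "!@#$%^&*()"
--     digits = "1234567890"
--     out = []
--     for ch in symbols:
--         converted = ch
--         for k, d in zip(keys, digits):
--             if ch == k:
--                 converted = d
--                 break
--         out.append(converted)
--     return "".join(out)
-- ===== Notes on version B (the rewrite author's own statement) =====
-- stated objective: alternative
-- what changed: B makes one pass over the input characters, converting each via a linear scan of two parallel key/digit strings into an accumulator, instead of A's ten whole-string replace passes over a dict; safe because the output digits are never keys, so no replacement cascades.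
import Mathlib
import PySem

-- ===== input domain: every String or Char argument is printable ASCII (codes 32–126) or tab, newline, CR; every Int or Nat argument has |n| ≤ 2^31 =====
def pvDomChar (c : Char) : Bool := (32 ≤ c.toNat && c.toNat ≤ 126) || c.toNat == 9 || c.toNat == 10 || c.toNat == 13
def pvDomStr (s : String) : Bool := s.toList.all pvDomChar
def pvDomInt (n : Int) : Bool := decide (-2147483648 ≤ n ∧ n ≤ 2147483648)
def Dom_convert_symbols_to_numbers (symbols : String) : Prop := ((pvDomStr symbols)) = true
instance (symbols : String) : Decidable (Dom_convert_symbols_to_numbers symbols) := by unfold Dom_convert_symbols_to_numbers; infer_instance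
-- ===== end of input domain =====

-- B makes one pass over the characters with a linear scan of parallel key/digit strings into an
-- accumulator, instead of A's ten whole-string replace passes over a dict (alternative decomposition).

-- ===== PORT A =====
-- the symbol_map dict of A, in insertion order
def pvSymbolMap : PySem.Dict String String :=
  ⟨[("!", "1"), ("@", "2"), ("#", "3"), ("$", "4"), ("%", "5"),
    ("^", "6"), ("&", "7"), ("*", "8"), ("(", "9"), (")", "0")]⟩

def convert_symbols_to_numbers (symbols : String) : String :=
  -- result = symbols; for symbol, number in symbol_map.items(): result = result.replace(symbol, number)
  pvSymbolMap.items.foldl (fun result p => PySem.Str.replace result p.1 p.2) symbols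

-- ===== PORT B =====
-- zip(keys, digits)
def pvPairs : List (Char × Char) := "!@#$%^&*()".toList.zip "1234567890".toList

-- inner loop: 'converted = ch; for k, d in zip(keys, digits): if ch == k: converted = d; break'
def pvConvertChar : List (Char × Char) → Char → Char
  | [], ch => ch
  | (k, d) :: rest, ch => if ch = k then d else pvConvertChar rest ch

-- outer loop: 'for ch in symbols: out.append(converted)' then '"".join(out)'
def pvBuild : List Char → List Char → List Char
  | [], out => out.reverse
  | ch :: rest, out => pvBuild rest (pvConvertChar pvPairs ch :: out)

def convert_symbols_to_numbers_alt (symbols : String) : String :=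
  String.ofList (pvBuild symbols.toList [])

-- ===== PRECONDITION & SPEC =====
def Spec_convert_symbols_to_numbers (symbols : String) (out : String) : Prop := out = convert_symbols_to_numbers_alt symbols
instance (symbols : String) (out : String) : Decidable (Spec_convert_symbols_to_numbers symbols out) := by unfold Spec_convert_symbols_to_numbers; infer_instance

-- ===== CLAIM (what is proved, stated in full; the proofs are below) =====
def Claim_equal_convert_symbols_to_numbers : Prop := ∀ (symbols : String), Dom_convert_symbols_to_numbers symbols → Spec_convert_symbols_to_numbers symbols (convert_symbols_to_numbers symbols)

-- ===== LEMMAS AND PROOFS =====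

-- point substitution of one character
def pvSubst (a b c : Char) : Char := if c = a then b else c

-- the composition of A's ten single-character substitutions
def pvG : Char → Char :=
  pvSubst ')' '0' ∘ pvSubst '(' '9' ∘ pvSubst '*' '8' ∘ pvSubst '&' '7' ∘ pvSubst '^' '6' ∘
    pvSubst '%' '5' ∘ pvSubst '$' '4' ∘ pvSubst '#' '3' ∘ pvSubst '@' '2' ∘ pvSubst '!' '1'

theorem pv_go_single (a b : Char) : ∀ (fuel : Nat) (l acc : List Char), l.length ≤ fuel →
    PySem.Chars.replace.go [a] [b] fuel l acc = acc.reverse ++ l.map (pvSubst a b) := by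
  intro fuel
  induction fuel with
  | zero =>
    intro l acc h
    have : l = [] := List.length_eq_zero_iff.mp (Nat.le_zero.mp h)
    subst this; simp [PySem.Chars.replace.go]
  | succ n ih =>
    intro l acc h
    cases l with
    | nil => simp [PySem.Chars.replace.go]
    | cons c t =>
      simp only [PySem.Chars.replace.go]
      by_cases hc : c = a
      · subst hc
        have hp : [c].isPrefixOf (c :: t) = true := by simp [List.isPrefixOf]
        rw [if_pos hp]
        have := ih t (b :: acc) (by simpa using Nat.le_of_succ_le_succ h)
        simpa [pvSubst, List.map_cons] using this
      · have hp : [a].isPrefixOf (c :: t) = false := by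
          simp [List.isPrefixOf]; exact fun h' => hc h'.symm
        rw [hp]
        simp only [Bool.false_eq_true, if_false]
        have := ih t (c :: acc) (by simpa using Nat.le_of_succ_le_succ h)
        simpa [pvSubst, hc] using this

theorem pv_replace_single (a b : Char) (l : List Char) :
    PySem.Chars.replace l [a] [b] = l.map (pvSubst a b) := by
  rw [PySem.Chars.replace]
  simp only [List.isEmpty_cons, Bool.false_eq_true, if_false]
  simpa using pv_go_single a b l.length l [] (le_refl _)

theorem pv_A_eq (s : String) :
    convert_symbols_to_numbers s = String.ofList (s.toList.map pvG) := by
  simp only [convert_symbols_to_numbers, pvSymbolMap, List.foldl,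
    PySem.Str.replace]
  simp [pv_replace_single, List.map_map, pvG]

-- B's per-character scan computes the same substitution composition
theorem pv_convertChar_eq (c : Char) : pvConvertChar pvPairs c = pvG c := by
  by_cases h1 : c = '!'; · subst h1; decide
  by_cases h2 : c = '@'; · subst h2; decide
  by_cases h3 : c = '#'; · subst h3; decide
  by_cases h4 : c = '$'; · subst h4; decide
  by_cases h5 : c = '%'; · subst h5; decide
  by_cases h6 : c = '^'; · subst h6; decide
  by_cases h7 : c = '&'; · subst h7; decide
  by_cases h8 : c = '*'; · subst h8; decide
  by_cases h9 : c = '('; · subst h9; decide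
  by_cases h10 : c = ')'; · subst h10; decide
  have hp : pvPairs = [('!', '1'), ('@', '2'), ('#', '3'), ('$', '4'), ('%', '5'),
      ('^', '6'), ('&', '7'), ('*', '8'), ('(', '9'), (')', '0')] := by decide
  rw [hp]
  simp [pvConvertChar, pvG, pvSubst, h1, h2, h3, h4, h5, h6, h7, h8, h9, h10]

theorem pv_build_eq (l : List Char) : ∀ acc, pvBuild l acc = acc.reverse ++ l.map pvG := by
  induction l with
  | nil => intro acc; simp [pvBuild]
  | cons c t ih =>
    intro acc
    simp [pvBuild, ih, pv_convertChar_eq]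

theorem pv_B_eq (s : String) :
    convert_symbols_to_numbers_alt s = String.ofList (s.toList.map pvG) := by
  simp [convert_symbols_to_numbers_alt, pv_build_eq]

-- ===== VERDICT (by name: the statement is the Claim_ definition above) =====
theorem convert_symbols_to_numbers_spec : Claim_equal_convert_symbols_to_numbers := by
  intro s _
  show _ = _
  rw [pv_A_eq, pv_B_eq]
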